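-- pv_equiv track=rewrite | github.com/virgulilla/zoo | zoo_dict.py | calculoPrecioYTipoBillete
-- ===== SOURCE A (Python) =====
-- catalogo_entradas = {
--     "GRATUITA": {"precio": 0, "e_umbral": 3},
--     "NINYOS": {"precio": 14, "e_umbral": 13},
--     "ADULTOS": {"precio": 23, "e_umbral": 65},
--     "JUBILADOS": {"precio": 18, "e_umbral": float('inf')},
-- }
--
-- def calculoPrecioYTipoBillete(edad):
--     precio = 0
--     tipo = 0
--
--     for tipo in catalogo_entradas:
--         if edad < catalogo_entradas[tipo]["e_umbral"]:
--             precio = catalogo_entradas[tipo]["precio"]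
--             break
--
--     return precio, tipo
-- ===== SOURCE B (Python) =====
-- def calculoPrecioYTipoBillete(edad):
--     if edad < 3:
--         return 0, "GRATUITA"
--     elif edad < 13:
--         return 14, "NINYOS"
--     elif edad < 65:
--         return 23, "ADULTOS"
--     else:
--         return 18, "JUBILADOS"
-- ===== Notes on version B (the rewrite author's own statement) =====
-- stated objective: simpler
-- what changed: Replaced the dict catalog, loop and break with a direct if/elif chain on edad returning each (price, type) pair literally.
import Mathlib
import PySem

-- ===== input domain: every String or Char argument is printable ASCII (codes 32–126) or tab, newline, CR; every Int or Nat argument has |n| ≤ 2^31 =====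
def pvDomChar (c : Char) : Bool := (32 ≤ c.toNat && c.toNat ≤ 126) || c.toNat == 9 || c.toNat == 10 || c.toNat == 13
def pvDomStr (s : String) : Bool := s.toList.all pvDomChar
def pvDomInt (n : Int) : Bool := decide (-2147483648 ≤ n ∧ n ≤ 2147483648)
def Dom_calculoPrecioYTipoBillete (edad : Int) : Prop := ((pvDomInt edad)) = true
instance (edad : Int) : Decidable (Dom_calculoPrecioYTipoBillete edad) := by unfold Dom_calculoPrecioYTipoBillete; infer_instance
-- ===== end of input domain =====

-- B replaces A's dict catalog and scanning loop by a direct if/elif chain (simpler).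

-- ===== PORT A =====
-- catalogo_entradas: (name, precio, e_umbral); threshold none = float('inf'),
-- which every Int edad satisfies (edad < inf is always true for an int).
def catalogoEntradas : List (String × Int × Option Int) :=
  [("GRATUITA", 0, some 3), ("NINYOS", 14, some 13),
   ("ADULTOS", 23, some 65), ("JUBILADOS", 18, none)]

def pvLtUmbral (edad : Int) : Option Int → Bool
  | some u => decide (edad < u)
  | none => true   -- edad < float('inf')

-- the for-loop with break: state (precio, tipo), tipo starts as int 0 but is
-- always overwritten by the first key; represented by scanning the list.
def calcLoop (edad : Int) : List (String × Int × Option Int) → Int × String → Int × String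
  | [], st => st
  | (t, p, u) :: rest, (precio, _) =>
      if pvLtUmbral edad u then (p, t)
      else calcLoop edad rest (precio, t)

def calculoPrecioYTipoBillete (edad : Int) : Int × String :=
  calcLoop edad catalogoEntradas (0, "")

-- ===== PORT B =====
def calculoPrecioYTipoBillete_alt (edad : Int) : Int × String :=
  if edad < 3 then (0, "GRATUITA")
  else if edad < 13 then (14, "NINYOS")
  else if edad < 65 then (23, "ADULTOS")
  else (18, "JUBILADOS")

-- ===== PRECONDITION & SPEC =====
def Spec_calculoPrecioYTipoBillete (edad : Int) (out : Int × String) : Prop := out = calculoPrecioYTipoBillete_alt edad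
instance (edad : Int) (out : Int × String) : Decidable (Spec_calculoPrecioYTipoBillete edad out) := by unfold Spec_calculoPrecioYTipoBillete; infer_instance

-- ===== CLAIM (what is proved, stated in full; the proofs are below) =====
def Claim_equal_calculoPrecioYTipoBillete : Prop := ∀ (edad : Int), Dom_calculoPrecioYTipoBillete edad → Spec_calculoPrecioYTipoBillete edad (calculoPrecioYTipoBillete edad)

-- ===== LEMMAS AND PROOFS =====

-- ===== VERDICT (by name: the statement is the Claim_ definition above) =====
theorem calculoPrecioYTipoBillete_spec : Claim_equal_calculoPrecioYTipoBillete := by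
  intro edad _
  unfold Spec_calculoPrecioYTipoBillete calculoPrecioYTipoBillete calculoPrecioYTipoBillete_alt
  simp only [catalogoEntradas, calcLoop, pvLtUmbral]
  split_ifs <;> simp_all
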